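-- pv_equiv track=rewrite | github.com/andrewbaine/td-gammon | gnubg_codec.py | n
-- ===== SOURCE A (Python) =====
-- def bit(bs, i):
--     b = bs[i // 8]
--     return 1 if (b & (1 << (i % 8))) else 0
--
-- def n(bs, start, end):
--     assert start < end
--     n = 0
--     b = 1
--     for i in range(start, end):
--         n += bit(bs, i) * b
--         b *= 2
--     return n
-- ===== SOURCE B (Python) =====
-- def n(bs, start, end):
--     assert start < end
--     fb = start // 8
--     lb = (end - 1) // 8
--     v = 0
--     for j in range(fb, lb + 1):
--         v += (bs[j] & 255) << (8 * (j - fb))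
--     return (v >> (start - 8 * fb)) & ((1 << (end - start)) - 1)
-- ===== Notes on version B (the rewrite author's own statement) =====
-- stated objective: faster
-- what changed: Replaces the per-bit loop (one list access, mask test and multiply per bit) by byte-level extraction: read each covered byte once, assemble them into one integer, then shift and mask once.
import Mathlib
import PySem

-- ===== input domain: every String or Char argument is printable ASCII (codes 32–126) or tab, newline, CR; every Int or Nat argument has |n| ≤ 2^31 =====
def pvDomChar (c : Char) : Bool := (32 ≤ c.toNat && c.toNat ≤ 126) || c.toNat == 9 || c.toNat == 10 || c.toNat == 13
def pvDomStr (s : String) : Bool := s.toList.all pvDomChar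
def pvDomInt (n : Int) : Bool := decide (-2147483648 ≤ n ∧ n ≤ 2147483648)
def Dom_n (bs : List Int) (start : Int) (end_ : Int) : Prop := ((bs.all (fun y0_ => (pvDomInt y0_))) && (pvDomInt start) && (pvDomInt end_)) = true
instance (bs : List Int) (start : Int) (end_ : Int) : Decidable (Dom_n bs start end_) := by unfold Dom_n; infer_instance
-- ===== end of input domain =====

-- B replaces A's per-bit accumulation loop by byte-level extraction (read each covered
-- byte once, assemble an integer, then one shift-and-mask); proved to return A's exact value.


-- ===== PORT A =====
-- helper `bit(bs, i)` of A (its local variable b inlined)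
def bitA (bs : List Int) (i : Int) : Int :=
  if PySem.Int.band (PySem.List.pyGetD bs (PySem.Int.floordiv i 8) 0)
      ((1 : Int) <<< (PySem.Int.mod i 8).toNat) ≠ 0 then 1 else 0

def n (bs : List Int) (start : Int) (end_ : Int) : Int :=
  ((PySem.List.pyRange start end_ 1).foldl
      (fun (st : Int × Int) i => (st.1 + bitA bs i * st.2, st.2 * 2)) (0, 1)).1

-- ===== PORT B =====
def n_alt (bs : List Int) (start : Int) (end_ : Int) : Int :=
  let fb := PySem.Int.floordiv start 8
  let lb := PySem.Int.floordiv (end_ - 1) 8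
  let v := (PySem.List.pyRange fb (lb + 1) 1).foldl
      (fun (v : Int) j =>
        v + (PySem.Int.band (PySem.List.pyGetD bs j 0) 255) <<< (8 * (j - fb)).toNat) 0
  PySem.Int.band (v >>> (start - 8 * fb).toNat) (((1 : Int) <<< (end_ - start).toNat) - 1)

-- ===== PRECONDITION & SPEC =====
-- Pre_n: exactly where the Python A returns: the assert start < end holds, and every byte
-- index i//8 it touches (the contiguous block start//8 .. (end-1)//8) is a valid Python index.
def Pre_n (bs : List Int) (start : Int) (end_ : Int) : Prop :=
  start < end_ ∧ PySem.Raise.InRange bs.length (PySem.Int.floordiv start 8)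
    ∧ PySem.Raise.InRange bs.length (PySem.Int.floordiv (end_ - 1) 8)
instance (bs : List Int) (start : Int) (end_ : Int) : Decidable (Pre_n bs start end_) := by
  unfold Pre_n; infer_instance

def pvWitness_n : List Int × Int × Int := ([5, 200], 3, 13)

def Spec_n (bs : List Int) (start : Int) (end_ : Int) (out : Int) : Prop := out = n_alt bs start end_
instance (bs : List Int) (start : Int) (end_ : Int) (out : Int) : Decidable (Spec_n bs start end_ out) := by unfold Spec_n; infer_instance

-- ===== CLAIM (what is proved, stated in full; the proofs are below) =====
def Claim_equal_n : Prop := ∀ (bs : List Int) (start : Int) (end_ : Int), Dom_n bs start end_ → Pre_n bs start end_ → Spec_n bs start end_ (n bs start end_)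

-- ===== LEMMAS AND PROOFS =====

-- the byte value A's bit test reads from list position j, as a natural number < 256
def pvByte (bs : List Int) (j : Int) : Nat :=
  (PySem.Int.band (PySem.List.pyGetD bs j 0) 255).toNat

-- the integer B assembles from the cnt bytes starting at list position fb
def pvVal (bs : List Int) (fb : Int) (cnt : Nat) : Nat :=
  ∑ t ∈ Finset.range cnt, pvByte bs (fb + (t : Int)) * 2 ^ (8 * t)

theorem pv_band255 (b : Int) : PySem.Int.band b 255 = b % 256 := by
  have h28 : (2 : Nat) ^ 8 = 256 := by norm_num
  rcases (by omega : 0 ≤ b ∨ b < 0) with hb | hb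
  · rw [PySem.Int.band_of_nonneg hb (by norm_num)]
    rw [show ((255 : Int)).toNat = (255 : Nat) from rfl,
      show (255 : Nat) = 2 ^ 8 - 1 from by norm_num, Nat.and_two_pow_sub_one_eq_mod]
    omega
  · unfold PySem.Int.band
    rw [if_neg (by omega : ¬ (0 : Int) ≤ b), if_pos (by norm_num : (0 : Int) ≤ 255)]
    rw [show ((255 : Int)).toNat = (255 : Nat) from rfl,
      Nat.and_comm, show (255 : Nat) = 2 ^ 8 - 1 from by norm_num,
      Nat.and_two_pow_sub_one_eq_mod]
    omega

theorem pv_byte_lt (bs : List Int) (j : Int) : pvByte bs j < 256 := by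
  unfold pvByte
  rw [pv_band255]
  omega

theorem pv_byte_cast (bs : List Int) (j : Int) :
    ((pvByte bs j : Nat) : Int) = PySem.Int.band (PySem.List.pyGetD bs j 0) 255 := by
  unfold pvByte
  rw [pv_band255]
  omega

set_option maxRecDepth 8192 in
theorem pv_testBit_compl : ∀ r < 256, ∀ k < 8, Nat.testBit (255 - r) k = ! Nat.testBit r k := by
  decide

theorem pv_bit_iff (b : Int) (k : Nat) (hk : k < 8) :
    (PySem.Int.band b ((1 : Int) <<< k) ≠ 0) ↔ Nat.testBit (PySem.Int.band b 255).toNat k := by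
  have hshift : ((1 : Int) <<< k) = ((2 ^ k : Nat) : Int) := by
    rw [show ((1 : Int) <<< k) = (((1 <<< k : Nat) : Nat) : Int) from rfl, Nat.one_shiftLeft]
  have h28 : (2 : Nat) ^ 8 = 256 := by norm_num
  rw [pv_band255, hshift]
  rcases (by omega : 0 ≤ b ∨ b < 0) with hb | hb
  · rw [PySem.Int.band_of_nonneg hb (Int.natCast_nonneg _)]
    rw [Int.toNat_natCast, Nat.and_two_pow]
    have hmod : (b % 256).toNat = b.toNat % 256 := by omega
    rw [hmod, ← h28, Nat.testBit_mod_two_pow, decide_eq_true hk, Bool.true_and]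
    cases hbit : b.toNat.testBit k <;> simp
  · unfold PySem.Int.band
    rw [if_neg (by omega : ¬ (0 : Int) ≤ b), if_pos (Int.natCast_nonneg _)]
    rw [Int.toNat_natCast]
    have hmv : (((-b - 1).toNat : Nat) : Int) = -b - 1 := by omega
    have hand : 2 ^ k &&& (-b - 1).toNat = (((-b - 1).toNat.testBit k).toNat) * 2 ^ k := by
      rw [Nat.and_comm, Nat.and_two_pow]
    have hmod : (b % 256).toNat = 255 - (-b - 1).toNat % 256 := by omega
    rw [hmod, pv_testBit_compl ((-b - 1).toNat % 256) (by omega) k hk, ← h28,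
      Nat.testBit_mod_two_pow, decide_eq_true hk, Bool.true_and, hand]
    cases hbit : (-b - 1).toNat.testBit k <;> simp

theorem pv_testBit_digits :
    ∀ (cnt : Nat) (g : Nat → Nat), (∀ t, g t < 256) → ∀ (t k : Nat), t < cnt → k < 8 →
      Nat.testBit (∑ u ∈ Finset.range cnt, g u * 2 ^ (8 * u)) (8 * t + k)
        = Nat.testBit (g t) k := by
  intro cnt
  induction cnt with
  | zero => intro g hg t k ht hk; omega
  | succ c ih =>
    intro g hg t k ht hk
    rw [Finset.sum_range_succ']
    set R := ∑ u ∈ Finset.range c, g (u + 1) * 2 ^ (8 * u) with hR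
    have hterm : ∀ u ∈ Finset.range c,
        g (u + 1) * 2 ^ (8 * (u + 1)) = 2 ^ 8 * (g (u + 1) * 2 ^ (8 * u)) := by
      intro u _
      rw [show 8 * (u + 1) = 8 + 8 * u from by ring, pow_add]
      ring
    have hsplit : (∑ u ∈ Finset.range c, g (u + 1) * 2 ^ (8 * (u + 1))) + g 0 * 2 ^ (8 * 0)
        = g 0 + 2 ^ 8 * R := by
      rw [hR, Finset.mul_sum, Finset.sum_congr rfl hterm]
      simp only [Nat.mul_zero, pow_zero, Nat.mul_one]
      omega
    rw [hsplit]
    cases t with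
    | zero =>
      simp only [Nat.mul_zero, Nat.zero_add]
      have hmod : (g 0 + 2 ^ 8 * R) % 2 ^ 8 = g 0 := by
        rw [Nat.add_mul_mod_self_left]
        exact Nat.mod_eq_of_lt (hg 0)
      have h1 := Nat.testBit_mod_two_pow (g 0 + 2 ^ 8 * R) 8 k
      rw [hmod, decide_eq_true hk, Bool.true_and] at h1
      exact h1.symm
    | succ t' =>
      rw [show 8 * (t' + 1) + k = 8 + (8 * t' + k) from by ring, ← Nat.testBit_shiftRight]
      have hdiv : (g 0 + 2 ^ 8 * R) >>> 8 = R := by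
        rw [Nat.shiftRight_eq_div_pow,
          Nat.add_mul_div_left _ _ (Nat.two_pow_pos 8), Nat.div_eq_of_lt (hg 0)]
        omega
      rw [hdiv]
      exact ih (fun u => g (u + 1)) (fun u => hg (u + 1)) t' k (by omega) hk

theorem pv_mod_two_pow_sum (L : Nat) (x : Nat) :
    x % 2 ^ L = ∑ k ∈ Finset.range L, (Nat.testBit x k).toNat * 2 ^ k := by
  induction L with
  | zero => simp [Nat.mod_one]
  | succ L ih =>
    rw [Finset.sum_range_succ, ← ih, Nat.mod_pow_succ]
    have htb : (x.testBit L).toNat = x / 2 ^ L % 2 := by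
      rw [Nat.testBit_eq_decide_div_mod_eq]
      rcases Nat.mod_two_eq_zero_or_one (x / 2 ^ L) with h | h <;> simp [h]
    rw [htb]
    ring

theorem pv_foldA (bs : List Int) :
    ∀ (L : Nat) (a acc p : Int),
      ((PySem.List.pyRange a (a + (L : Int)) 1).foldl
          (fun (st : Int × Int) i => (st.1 + bitA bs i * st.2, st.2 * 2)) (acc, p)).1
        = acc + p * ∑ k ∈ Finset.range L, bitA bs (a + (k : Int)) * 2 ^ k := by
  intro L
  induction L with
  | zero =>
    intro a acc p
    rw [PySem.List.pyRange_one_eq_nil (by simp)]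
    simp
  | succ L ih =>
    intro a acc p
    have hlt : a < a + ((L + 1 : Nat) : Int) := by push_cast; omega
    rw [PySem.List.pyRange_one_cons hlt, List.foldl_cons,
      show ((acc, p).1 + bitA bs a * (acc, p).2, (acc, p).2 * 2)
        = (acc + bitA bs a * p, p * 2) from rfl,
      show a + ((L + 1 : Nat) : Int) = (a + 1) + (L : Int) from by push_cast; ring,
      ih (a + 1) (acc + bitA bs a * p) (p * 2), Finset.sum_range_succ']
    push_cast
    have harg : ∀ x : Int, a + (x + 1) = a + 1 + x := fun x => by ring
    simp only [harg, add_zero, mul_one]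
    have hsum : ∑ k ∈ Finset.range L, bitA bs (a + 1 + (k : Int)) * 2 ^ (k + 1)
        = 2 * ∑ k ∈ Finset.range L, bitA bs (a + 1 + (k : Int)) * 2 ^ k := by
      rw [Finset.mul_sum]
      refine Finset.sum_congr rfl fun x _ => ?_
      rw [pow_succ]
      ring
    rw [hsum]
    ring

theorem pv_foldB (bs : List Int) (fb : Int) :
    ∀ (cnt : Nat) (a acc : Int),
      ((PySem.List.pyRange a (a + (cnt : Int)) 1).foldl
          (fun (v : Int) j =>
            v + (PySem.Int.band (PySem.List.pyGetD bs j 0) 255) <<< (8 * (j - fb)).toNat) acc)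
        = acc + ∑ t ∈ Finset.range cnt,
            ((pvByte bs (a + (t : Int)) : Nat) : Int) * 2 ^ (8 * (a + (t : Int) - fb)).toNat := by
  intro cnt
  induction cnt with
  | zero =>
    intro a acc
    rw [PySem.List.pyRange_one_eq_nil (by simp)]
    simp
  | succ c ih =>
    intro a acc
    have hlt : a < a + ((c + 1 : Nat) : Int) := by push_cast; omega
    rw [PySem.List.pyRange_one_cons hlt, List.foldl_cons,
      show a + ((c + 1 : Nat) : Int) = (a + 1) + (c : Int) from by push_cast; ring,
      ih (a + 1) (acc + (PySem.Int.band (PySem.List.pyGetD bs a 0) 255) <<< (8 * (a - fb)).toNat),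
      Finset.sum_range_succ']
    push_cast
    have harg : ∀ x : Int, a + (x + 1) = a + 1 + x := fun x => by ring
    simp only [harg, add_zero]
    rw [show (PySem.Int.band (PySem.List.pyGetD bs a 0) 255) <<< (8 * (a - fb)).toNat
        = ((pvByte bs a : Nat) : Int) * 2 ^ (8 * (a - fb)).toNat from by
      rw [Int.shiftLeft_eq, pv_byte_cast]]
    ring

-- ===== VERDICT (by name: the statement is the Claim_ definition above) =====
theorem n_spec : Claim_equal_n := by
  intro bs start end_ _ hpre
  obtain ⟨hlt, _, _⟩ := hpre
  unfold Spec_n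
  set fb := PySem.Int.floordiv start 8 with hfbdef
  set lb := PySem.Int.floordiv (end_ - 1) 8 with hlbdef
  have hmod8 : fb * 8 + PySem.Int.mod start 8 = start := by
    rw [hfbdef]; exact PySem.Int.floordiv_mul_add_mod start 8
  have hmnn : 0 ≤ PySem.Int.mod start 8 := PySem.Int.mod_nonneg start (by norm_num)
  have hmlt : PySem.Int.mod start 8 < 8 := PySem.Int.mod_lt start (by norm_num)
  have hfb_lb : fb ≤ lb := by
    rw [hfbdef, hlbdef, PySem.Int.floordiv_eq_ediv_of_pos (by norm_num : (0:Int) < 8),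
      PySem.Int.floordiv_eq_ediv_of_pos (by norm_num : (0:Int) < 8)]
    exact Int.ediv_le_ediv (by norm_num) (by omega)
  obtain ⟨s, hs, hs8⟩ : ∃ s : Nat, (s : Int) = start - 8 * fb ∧ s < 8 :=
    ⟨(start - 8 * fb).toNat, by omega, by omega⟩
  obtain ⟨L, hL, hL0⟩ : ∃ L : Nat, (L : Int) = end_ - start ∧ 0 < L :=
    ⟨(end_ - start).toNat, by omega, by omega⟩
  obtain ⟨cnt, hcnt⟩ : ∃ c : Nat, (c : Int) = lb + 1 - fb :=
    ⟨(lb + 1 - fb).toNat, by omega⟩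
  -- A's loop value
  have hA : n bs start end_ = ((pvVal bs fb cnt / 2 ^ s % 2 ^ L : Nat) : Int) := by
    unfold n
    rw [show end_ = start + (L : Int) from by omega, pv_foldA bs L start 0 1]
    have hterm : ∀ k ∈ Finset.range L, bitA bs (start + (k : Int)) * 2 ^ k
        = ((Nat.testBit (pvVal bs fb cnt / 2 ^ s) k).toNat : Int) * 2 ^ k := by
      intro k hk
      rw [Finset.mem_range] at hk
      obtain ⟨t, r, htr, hrlt⟩ : ∃ t r : Nat, 8 * t + r = s + k ∧ r < 8 :=
        ⟨(s + k) / 8, (s + k) % 8, Nat.div_add_mod (s + k) 8, Nat.mod_lt _ (by norm_num)⟩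
      have hdiv : PySem.Int.floordiv (start + (k : Int)) 8 = fb + (t : Int) := by
        rw [PySem.Int.floordiv_eq_iff_of_pos (by norm_num : (0:Int) < 8)]
        refine ⟨by omega, by omega⟩
      have hmn2 : 0 ≤ PySem.Int.mod (start + (k : Int)) 8 :=
        PySem.Int.mod_nonneg _ (by norm_num)
      have hml2 : PySem.Int.mod (start + (k : Int)) 8 < 8 :=
        PySem.Int.mod_lt _ (by norm_num)
      have hmodk : (PySem.Int.mod (start + (k : Int)) 8).toNat = r := by
        have h1 := PySem.Int.floordiv_mul_add_mod (start + (k : Int)) 8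
        rw [hdiv] at h1
        omega
      have htlb : fb + (t : Int) ≤ lb := by
        rw [← hdiv, hlbdef, PySem.Int.floordiv_eq_ediv_of_pos (by norm_num : (0:Int) < 8),
          PySem.Int.floordiv_eq_ediv_of_pos (by norm_num : (0:Int) < 8)]
        exact Int.ediv_le_ediv (by norm_num) (by omega)
      have htcnt : t < cnt := by omega
      have hdig := pv_testBit_digits cnt (fun u => pvByte bs (fb + (u : Int)))
        (fun u => pv_byte_lt bs _) t r htcnt hrlt
      have hVb : Nat.testBit (pvVal bs fb cnt / 2 ^ s) k
          = Nat.testBit (pvByte bs (fb + (t : Int))) r := by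
        rw [← Nat.shiftRight_eq_div_pow, Nat.testBit_shiftRight, ← htr]
        exact hdig
      unfold bitA
      rw [hdiv, hmodk, hVb]
      by_cases hb : PySem.Int.band (PySem.List.pyGetD bs (fb + (t : Int)) 0)
          ((1 : Int) <<< r) ≠ 0
      · rw [if_pos hb]
        have htb : Nat.testBit (pvByte bs (fb + (t : Int))) r
            = true := (pv_bit_iff _ _ hrlt).mp hb
        rw [htb]
        norm_num
      · rw [if_neg hb]
        have htb : Nat.testBit (pvByte bs (fb + (t : Int))) r
            = false := by
          cases h : Nat.testBit (pvByte bs (fb + (t : Int))) r with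
          | false => rfl
          | true => exact absurd ((pv_bit_iff _ _ hrlt).mpr h) hb
        rw [htb]
        norm_num
    rw [Finset.sum_congr rfl hterm, pv_mod_two_pow_sum]
    push_cast
    ring
  -- B's value
  have hB : n_alt bs start end_ = ((pvVal bs fb cnt / 2 ^ s % 2 ^ L : Nat) : Int) := by
    show PySem.Int.band
        (((PySem.List.pyRange fb (lb + 1) 1).foldl
            (fun (v : Int) j =>
              v + (PySem.Int.band (PySem.List.pyGetD bs j 0) 255) <<< (8 * (j - fb)).toNat) 0)
          >>> (start - 8 * fb).toNat)
        (((1 : Int) <<< (end_ - start).toNat) - 1) = _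
    rw [show lb + 1 = fb + (cnt : Int) from by omega, pv_foldB bs fb cnt fb 0,
      show (start - 8 * fb).toNat = s from by omega,
      show (end_ - start).toNat = L from by omega]
    have hexp : ∀ t ∈ Finset.range cnt,
        ((pvByte bs (fb + (t : Int)) : Nat) : Int) * 2 ^ (8 * (fb + (t : Int) - fb)).toNat
          = ((pvByte bs (fb + (t : Int)) : Nat) : Int) * 2 ^ (8 * t) := by
      intro t _
      have h1 : (8 * (fb + (t : Int) - fb)).toNat = 8 * t := by omega
      rw [h1]
    rw [Finset.sum_congr rfl hexp,
      show (0 : Int) + ∑ t ∈ Finset.range cnt,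
          ((pvByte bs (fb + (t : Int)) : Nat) : Int) * 2 ^ (8 * t)
        = ((pvVal bs fb cnt : Nat) : Int) from by unfold pvVal; push_cast; ring,
      show ((pvVal bs fb cnt : Nat) : Int) >>> s = ((pvVal bs fb cnt >>> s : Nat) : Int) from rfl,
      show ((1 : Int) <<< L) = ((2 ^ L : Nat) : Int) from by
        rw [show ((1 : Int) <<< L) = (((1 <<< L : Nat) : Nat) : Int) from rfl, Nat.one_shiftLeft],
      show ((2 ^ L : Nat) : Int) - 1 = ((2 ^ L - 1 : Nat) : Int) from by
        have := Nat.two_pow_pos L; omega,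
      PySem.Int.band_natCast, Nat.shiftRight_eq_div_pow, Nat.and_two_pow_sub_one_eq_mod]
  rw [hA, hB]
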